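-- pv_equiv track=rewrite | github.com/DapeSec/Discord-PG-Bot | src/services/conversation_coordinator/server.py | _topics_related
-- ===== SOURCE A (Python) =====
-- def _topics_related(topic1: str, topic2: str) -> bool:
--     """Check if two topics are related"""
--     related_groups = [
--         {'food', 'family', 'work'},
--         {'politics', 'science', 'technology'},
--         {'entertainment', 'family'}
--     ]
--
--     for group in related_groups:
--         if topic1 in group and topic2 in group:
--             return True
--     return False
-- ===== SOURCE B (Python) =====
-- # Inverted index: topic -> set of indices of the related groups it belongs to,
-- # built once; relatedness = the two topics' group-index sets intersect.
-- _TOPIC_TO_GROUPS = {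
--     'food': {0},
--     'family': {0, 2},
--     'work': {0},
--     'politics': {1},
--     'science': {1},
--     'technology': {1},
--     'entertainment': {2},
-- }
--
--
-- def _topics_related(topic1: str, topic2: str) -> bool:
--     g1 = _TOPIC_TO_GROUPS.get(topic1, set())
--     g2 = _TOPIC_TO_GROUPS.get(topic2, set())
--     return bool(g1 & g2)
-- ===== Notes on version B (the rewrite author's own statement) =====
-- stated objective: simpler
-- what changed: Replaces the per-call loop over the three groups with double membership tests by a precomputed inverted index (topic -> set of group indices) and a single set-intersection of two lookups.
import Mathlib
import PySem

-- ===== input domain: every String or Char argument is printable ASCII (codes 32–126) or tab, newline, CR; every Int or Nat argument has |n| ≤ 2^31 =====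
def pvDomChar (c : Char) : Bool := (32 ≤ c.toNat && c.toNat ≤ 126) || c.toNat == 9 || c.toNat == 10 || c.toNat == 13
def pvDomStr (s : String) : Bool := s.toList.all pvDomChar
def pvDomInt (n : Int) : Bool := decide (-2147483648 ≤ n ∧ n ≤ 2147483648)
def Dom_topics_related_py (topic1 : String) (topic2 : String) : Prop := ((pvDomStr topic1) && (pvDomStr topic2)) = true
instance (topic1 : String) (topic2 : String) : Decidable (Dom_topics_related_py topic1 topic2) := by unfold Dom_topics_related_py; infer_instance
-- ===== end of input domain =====

-- B replaces A's per-call loop over the three groups by a precomputed inverted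
-- index (topic -> set of group indices) queried twice and intersected.


-- ===== PORT A =====
-- the literal `related_groups` list of A
def pvRelatedGroups : List (PySem.Set String) :=
  [PySem.Set.ofList ["food", "family", "work"],
   PySem.Set.ofList ["politics", "science", "technology"],
   PySem.Set.ofList ["entertainment", "family"]]

-- the `for group in related_groups` loop with its early return
def pvGroupLoop (topic1 : String) (topic2 : String) : List (PySem.Set String) → Bool
  | [] => false
  | g :: rest =>
      if PySem.Set.contains g topic1 && PySem.Set.contains g topic2 then true
      else pvGroupLoop topic1 topic2 rest

def topics_related_py (topic1 : String) (topic2 : String) : Bool :=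
  pvGroupLoop topic1 topic2 pvRelatedGroups

-- ===== PORT B =====
-- inverted index: topic -> set of indices of the groups containing it (module constant of Source B)
def pvTopicToGroups : PySem.Dict String (PySem.Set Int) :=
  PySem.Dict.ofList
    [("food", PySem.Set.ofList [0]),
     ("family", PySem.Set.ofList [0, 2]),
     ("work", PySem.Set.ofList [0]),
     ("politics", PySem.Set.ofList [1]),
     ("science", PySem.Set.ofList [1]),
     ("technology", PySem.Set.ofList [1]),
     ("entertainment", PySem.Set.ofList [2])]

def topics_related_py_alt (topic1 : String) (topic2 : String) : Bool :=
  let g1 := PySem.Dict.getD pvTopicToGroups topic1 PySem.Set.empty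
  let g2 := PySem.Dict.getD pvTopicToGroups topic2 PySem.Set.empty
  -- bool(g1 & g2): the intersection is non-empty
  !(PySem.Set.inter g1 g2).isEmpty

-- ===== PRECONDITION & SPEC =====
def Spec_topics_related_py (topic1 : String) (topic2 : String) (out : Bool) : Prop := out = topics_related_py_alt topic1 topic2
instance (topic1 : String) (topic2 : String) (out : Bool) : Decidable (Spec_topics_related_py topic1 topic2 out) := by unfold Spec_topics_related_py; infer_instance

-- ===== CLAIM (what is proved, stated in full; the proofs are below) =====
def Claim_equal_topics_related_py : Prop := ∀ (topic1 : String) (topic2 : String), Dom_topics_related_py topic1 topic2 → Spec_topics_related_py topic1 topic2 (topics_related_py topic1 topic2)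

-- ===== LEMMAS AND PROOFS =====

-- every string is one of the seven indexed topics or none of them
lemma pvTopicCases (s : String) :
    s = "food" ∨ s = "family" ∨ s = "work" ∨ s = "politics" ∨ s = "science" ∨
    s = "technology" ∨ s = "entertainment" ∨
    (s ≠ "food" ∧ s ≠ "family" ∧ s ≠ "work" ∧ s ≠ "politics" ∧ s ≠ "science" ∧
     s ≠ "technology" ∧ s ≠ "entertainment") := by
  tauto

-- lookup in the empty dict literal
lemma pvGetNil {kappa nu : Type} [BEq kappa] (k : kappa) :
    PySem.Dict.get? (PySem.Dict.mk ([] : List (kappa × nu))) k = none := rfl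

-- the index constant, evaluated to its literal items
lemma pvDictLit : pvTopicToGroups = PySem.Dict.mk
    [("food", [0]), ("family", [0, 2]), ("work", [0]), ("politics", [1]),
     ("science", [1]), ("technology", [1]), ("entertainment", [2])] := by decide

-- A is false when the SECOND topic is none of the seven
lemma pvAFalseRight (s t : String) (h1 : t ≠ "food") (h2 : t ≠ "family") (h3 : t ≠ "work")
    (h4 : t ≠ "politics") (h5 : t ≠ "science") (h6 : t ≠ "technology")
    (h7 : t ≠ "entertainment") : topics_related_py s t = false := by
  simp [topics_related_py, pvRelatedGroups, pvGroupLoop, PySem.Set.contains,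
    List.contains_eq_mem, h1, h2, h3, h4, h5, h6, h7]

-- A is false when the FIRST topic is none of the seven
lemma pvAFalseLeft (s t : String) (h1 : s ≠ "food") (h2 : s ≠ "family") (h3 : s ≠ "work")
    (h4 : s ≠ "politics") (h5 : s ≠ "science") (h6 : s ≠ "technology")
    (h7 : s ≠ "entertainment") : topics_related_py s t = false := by
  simp [topics_related_py, pvRelatedGroups, pvGroupLoop, PySem.Set.contains,
    List.contains_eq_mem, h1, h2, h3, h4, h5, h6, h7]

-- B is false when the SECOND topic is none of the seven
lemma pvBFalseRight (s t : String) (h1 : t ≠ "food") (h2 : t ≠ "family") (h3 : t ≠ "work")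
    (h4 : t ≠ "politics") (h5 : t ≠ "science") (h6 : t ≠ "technology")
    (h7 : t ≠ "entertainment") : topics_related_py_alt s t = false := by
  simp [topics_related_py_alt, pvDictLit, PySem.Dict.getD, PySem.Dict.get?_mk_cons,
    PySem.Set.inter, PySem.Set.contains, pvGetNil, Ne.symm h1, Ne.symm h2, Ne.symm h3,
    Ne.symm h4, Ne.symm h5, Ne.symm h6, Ne.symm h7]

-- B is false when the FIRST topic is none of the seven
lemma pvBFalseLeft (s t : String) (h1 : s ≠ "food") (h2 : s ≠ "family") (h3 : s ≠ "work")
    (h4 : s ≠ "politics") (h5 : s ≠ "science") (h6 : s ≠ "technology")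
    (h7 : s ≠ "entertainment") : topics_related_py_alt s t = false := by
  simp [topics_related_py_alt, pvDictLit, PySem.Dict.getD, PySem.Dict.get?_mk_cons,
    PySem.Set.inter, PySem.Set.contains, pvGetNil, Ne.symm h1, Ne.symm h2, Ne.symm h3,
    Ne.symm h4, Ne.symm h5, Ne.symm h6, Ne.symm h7]

-- ===== VERDICT (by name: the statement is the Claim_ definition above) =====
theorem topics_related_py_spec : Claim_equal_topics_related_py := by
  intro s t _
  unfold Spec_topics_related_py
  rcases pvTopicCases s with h | h | h | h | h | h | h | ⟨h1, h2, h3, h4, h5, h6, h7⟩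
  all_goals first
    | (rw [pvAFalseLeft s t h1 h2 h3 h4 h5 h6 h7, pvBFalseLeft s t h1 h2 h3 h4 h5 h6 h7])
    | (subst h
       rcases pvTopicCases t with h' | h' | h' | h' | h' | h' | h' | ⟨g1, g2, g3, g4, g5, g6, g7⟩ <;>
         first
           | (rw [pvAFalseRight _ t g1 g2 g3 g4 g5 g6 g7, pvBFalseRight _ t g1 g2 g3 g4 g5 g6 g7])
           | (subst h'; decide))
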